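-- pv_equiv track=rewrite | github.com/researchaiplus/researchaiplusweekly | src/newsletter/classification/subtopic_classifier.py | _normalize_subtopics
-- ===== SOURCE A (Python) =====
-- from collections.abc import Iterable, Sequence
--
-- def _normalize_subtopics(candidates: Sequence[str], allowed: dict[str, str]) -> list[str]:
--     normalized: list[str] = []
--     for candidate in candidates:
--         if not isinstance(candidate, str):
--             continue
--         cleaned = candidate.strip()
--         if not cleaned:
--             continue
--         lookup = allowed.get(cleaned.lower())
--         label = lookup or cleaned
--         if label not in normalized:
--             normalized.append(label)
--     if len(normalized) > 1:
--         return normalized[:2]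
--     return normalized
-- ===== SOURCE B (Python) =====
-- def _normalize_subtopics(candidates, allowed):
--     def label_of(candidate):
--         if not isinstance(candidate, str):
--             return None
--         cleaned = candidate.strip()
--         if not cleaned:
--             return None
--         return allowed.get(cleaned.lower()) or cleaned
--     it = iter(candidates)
--     for candidate in it:
--         first = label_of(candidate)
--         if first is not None:
--             break
--     else:
--         return []
--     for candidate in it:
--         second = label_of(candidate)
--         if second is not None and second != first:
--             return [first, second]
--     return [first]
-- ===== Notes on version B (the rewrite author's own statement) =====
-- stated objective: faster
-- what changed: A builds a deduplicated list across the whole input (linear membership test per append) and truncates to two at the end; B never builds that list: it searches for the first valid label, then scans the remaining candidates for the first valid label different from it, returning immediately (at most two labels can ever be returned).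
import Mathlib
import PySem

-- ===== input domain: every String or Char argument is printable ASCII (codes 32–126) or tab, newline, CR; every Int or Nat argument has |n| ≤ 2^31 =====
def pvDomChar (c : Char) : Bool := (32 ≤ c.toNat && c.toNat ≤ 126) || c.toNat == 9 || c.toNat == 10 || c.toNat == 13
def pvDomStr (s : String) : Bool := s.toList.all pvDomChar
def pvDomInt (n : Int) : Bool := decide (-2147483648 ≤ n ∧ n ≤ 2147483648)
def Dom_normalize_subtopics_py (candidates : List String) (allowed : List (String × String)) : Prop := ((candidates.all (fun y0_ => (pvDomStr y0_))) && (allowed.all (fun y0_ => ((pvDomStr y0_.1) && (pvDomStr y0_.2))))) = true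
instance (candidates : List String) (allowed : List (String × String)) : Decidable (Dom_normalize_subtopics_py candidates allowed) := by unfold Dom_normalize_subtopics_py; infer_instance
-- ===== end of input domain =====

-- B replaces A's accumulate-dedup-truncate loop with an early-exit two-stage search
-- (find the first valid label, then the first later valid label different from it);
-- correct because A returns at most two labels, and B stops as soon as it has them.


-- ===== PORT A =====
def normalize_subtopics_py (candidates : List String) (allowed : List (String × String)) : List String :=
  let normalized := candidates.foldl (fun normalized candidate =>
    let cleaned := PySem.Str.strip candidate
    if cleaned == "" then normalized
    else
      -- `lookup = allowed.get(cleaned.lower()); label = lookup or cleaned`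
      let label := match (PySem.Dict.mk allowed).get? (PySem.Str.lower cleaned) with
        | some s => if s == "" then cleaned else s
        | none => cleaned
      if normalized.contains label then normalized else normalized ++ [label]) []
  if normalized.length > 1 then PySem.List.slice normalized none (some 2) else normalized

-- ===== PORT B =====
-- B's helper `label_of`: None for blank candidates, else `allowed.get(cleaned.lower()) or cleaned`
def pvLabelOf (allowed : List (String × String)) (candidate : String) : Option String :=
  let cleaned := PySem.Str.strip candidate
  if cleaned == "" then none
  else
    match (PySem.Dict.mk allowed).get? (PySem.Str.lower cleaned) with
    | some s => some (if s == "" then cleaned else s)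
    | none => some cleaned

-- B's first loop over the iterator: first valid label and the unconsumed remainder
def pvFindFirst (allowed : List (String × String)) : List String → Option (String × List String)
  | [] => none
  | c :: cs =>
    match pvLabelOf allowed c with
    | some l => some (l, cs)
    | none => pvFindFirst allowed cs

-- B's second loop: first valid label different from `first`
def pvFindSecond (allowed : List (String × String)) (first : String) : List String → Option String
  | [] => none
  | c :: cs =>
    match pvLabelOf allowed c with
    | some l => if l != first then some l else pvFindSecond allowed first cs
    | none => pvFindSecond allowed first cs

def normalize_subtopics_py_alt (candidates : List String) (allowed : List (String × String)) : List String :=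
  match pvFindFirst allowed candidates with
  | none => []
  | some (first, rest) =>
    match pvFindSecond allowed first rest with
    | some second => [first, second]
    | none => [first]

-- ===== PRECONDITION & SPEC =====
def Spec_normalize_subtopics_py (candidates : List String) (allowed : List (String × String)) (out : List String) : Prop := out = normalize_subtopics_py_alt candidates allowed
instance (candidates : List String) (allowed : List (String × String)) (out : List String) : Decidable (Spec_normalize_subtopics_py candidates allowed out) := by unfold Spec_normalize_subtopics_py; infer_instance

-- ===== CLAIM (what is proved, stated in full; the proofs are below) =====
def Claim_equal_normalize_subtopics_py : Prop := ∀ (candidates : List String) (allowed : List (String × String)), Dom_normalize_subtopics_py candidates allowed → Spec_normalize_subtopics_py candidates allowed (normalize_subtopics_py candidates allowed)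

-- ===== LEMMAS AND PROOFS =====

-- the stream of valid labels a candidate list produces
def pvLabels (allowed : List (String × String)) (cs : List String) : List String :=
  cs.filterMap (pvLabelOf allowed)

-- ordered first-occurrence dedup relative to an already-seen accumulator
def pvDD (seen : List String) : List String → List String
  | [] => []
  | x :: xs => if seen.contains x then pvDD seen xs else x :: pvDD (seen ++ [x]) xs

-- A's loop from any accumulator is: accumulator ++ dedup of the label stream
theorem pv_loopA (allowed : List (String × String)) (cs : List String) (acc : List String) :
    cs.foldl (fun normalized candidate =>
      let cleaned := PySem.Str.strip candidate
      if cleaned == "" then normalized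
      else
        let label := match (PySem.Dict.mk allowed).get? (PySem.Str.lower cleaned) with
          | some s => if s == "" then cleaned else s
          | none => cleaned
        if normalized.contains label then normalized else normalized ++ [label]) acc
    = acc ++ pvDD acc (pvLabels allowed cs) := by
  induction cs generalizing acc with
  | nil => simp [pvLabels, pvDD]
  | cons c cs ih =>
    rw [List.foldl_cons]
    by_cases h : PySem.Str.strip c == ""
    · have hco : pvLabelOf allowed c = none := by simp [pvLabelOf, h]
      simp only [pvLabels, List.filterMap_cons, hco, h, ite_true]
      exact ih acc
    · cases hg : (PySem.Dict.mk allowed).get? (PySem.Str.lower (PySem.Str.strip c)) with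
      | none =>
        have hco : pvLabelOf allowed c = some (PySem.Str.strip c) := by
          simp [pvLabelOf, h, hg]
        simp only [pvLabels, List.filterMap_cons, hco, h, Bool.false_eq_true, ite_false, hg, pvDD]
        by_cases hc : acc.contains (PySem.Str.strip c) = true
        · simp only [hc, ite_true]
          exact ih acc
        · rw [Bool.not_eq_true] at hc
          simp only [hc, Bool.false_eq_true, ite_false]
          rw [ih (acc ++ [PySem.Str.strip c])]
          simp [pvLabels]
      | some s =>
        have hco : pvLabelOf allowed c = some (if s == "" then PySem.Str.strip c else s) := by
          simp [pvLabelOf, h, hg]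
        simp only [pvLabels, List.filterMap_cons, hco, h, Bool.false_eq_true, ite_false, hg, pvDD]
        by_cases hc : acc.contains (if s == "" then PySem.Str.strip c else s) = true
        · simp only [hc, ite_true]
          exact ih acc
        · rw [Bool.not_eq_true] at hc
          simp only [hc, Bool.false_eq_true, ite_false]
          rw [ih (acc ++ [if s == "" then PySem.Str.strip c else s])]
          simp [pvLabels]

-- B's first loop splits off the head of the label stream
theorem pv_first (allowed : List (String × String)) (cs : List String) :
    (pvFindFirst allowed cs = none ∧ pvLabels allowed cs = []) ∨
    (∃ f rest, pvFindFirst allowed cs = some (f, rest) ∧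
      pvLabels allowed cs = f :: pvLabels allowed rest) := by
  induction cs with
  | nil => exact Or.inl ⟨rfl, rfl⟩
  | cons c cs ih =>
    cases h : pvLabelOf allowed c with
    | none =>
      rcases ih with ⟨h1, h2⟩ | ⟨f, rest, h1, h2⟩
      · exact Or.inl ⟨by simp [pvFindFirst, h, h1], by simp only [pvLabels, List.filterMap_cons, h] at h2 ⊢; exact h2⟩
      · exact Or.inr ⟨f, rest, by simp [pvFindFirst, h, h1], by simp only [pvLabels, List.filterMap_cons, h] at h2 ⊢; exact h2⟩
    | some l =>
      exact Or.inr ⟨l, cs, by simp [pvFindFirst, h], by simp only [pvLabels, List.filterMap_cons, h]⟩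

-- B's second loop is find-first-different on the label stream
theorem pv_second (allowed : List (String × String)) (f : String) (cs : List String) :
    pvFindSecond allowed f cs = (pvLabels allowed cs).find? (fun l => l != f) := by
  induction cs with
  | nil => rfl
  | cons c cs ih =>
    cases h : pvLabelOf allowed c with
    | none => simp only [pvFindSecond, h, pvLabels, List.filterMap_cons] at ih ⊢; exact ih
    | some l =>
      by_cases hd : (l != f) = true
      · simp [pvFindSecond, h, pvLabels, hd]
      · have hd' : (l != f) = false := by simpa using hd
        simp only [pvFindSecond, h, Bool.false_eq_true, ite_false, pvLabels,
          List.filterMap_cons, List.find?_cons, hd'] at ih ⊢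
        exact ih

-- head-1 of the dedup continuation is the first element different from f
theorem pv_dd_head (f : String) (l : List String) :
    (pvDD [f] l).take 1 = ((l.find? (fun x => x != f)).map (fun x => [x])).getD [] := by
  induction l with
  | nil => rfl
  | cons x l ih =>
    by_cases hx : x = f
    · simp only [pvDD, hx, List.contains_cons, BEq.rfl, Bool.true_or, ite_true,
        List.find?_cons, bne_self_eq_false]
      exact ih
    · have hx' : (x != f) = true := by simpa using hx
      simp [pvDD, hx, hx']

theorem normalize_subtopics_py_final : ∀ (candidates : List String) (allowed : List (String × String)),
    normalize_subtopics_py candidates allowed = normalize_subtopics_py_alt candidates allowed := by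
  intro candidates allowed
  unfold normalize_subtopics_py normalize_subtopics_py_alt
  simp only [pv_loopA, List.nil_append]
  rcases pv_first allowed candidates with ⟨h1, h2⟩ | ⟨f, rest, h1, h2⟩
  · simp [h1, h2, pvDD]
  · simp only [h1, h2, pv_second]
    have hdd : pvDD [] (f :: pvLabels allowed rest) = f :: pvDD [f] (pvLabels allowed rest) := by
      simp [pvDD]
    rw [hdd]
    cases hfind : (pvLabels allowed rest).find? (fun l => l != f) with
    | none =>
      have hhead := pv_dd_head f (pvLabels allowed rest)
      rw [hfind] at hhead
      have hnil : pvDD [f] (pvLabels allowed rest) = [] := by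
        cases h : pvDD [f] (pvLabels allowed rest) with
        | nil => rfl
        | cons a t => rw [h] at hhead; simp at hhead
      simp [hnil]
    | some s =>
      have hhead := pv_dd_head f (pvLabels allowed rest)
      rw [hfind] at hhead
      cases h : pvDD [f] (pvLabels allowed rest) with
      | nil => rw [h] at hhead; simp at hhead
      | cons a t =>
        rw [h] at hhead
        have ha : a = s := by simpa using hhead
        subst ha
        rw [if_pos (by simp : (f :: a :: t).length > 1)]
        rw [PySem.List.slice_to (xs := f :: a :: t) (b := 2) (by norm_num)]
        simp

-- ===== VERDICT (by name: the statement is the Claim_ definition above) =====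
theorem normalize_subtopics_py_spec : Claim_equal_normalize_subtopics_py := by
  intro candidates allowed _
  exact normalize_subtopics_py_final candidates allowed
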